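-- pv_equiv track=rewrite | github.com/liafonx/Balatro-SaveRewinder | save_decoder.py | format_lua_table
-- ===== SOURCE A (Python) =====
-- def format_lua_table(text: str) -> str:
--     """
--     Heuristic pretty-printer for a Lua-style table dump.
--
--     It assumes the text is valid Lua and mainly reflows braces and commas
--     into a more readable, indented layout. It is intentionally simple and
--     is not a full Lua parser.
--     """
--     out_chars = []
--     indent = 0
--     in_string = False
--     string_quote = ""
--     escape = False
--
--     def indent_str(level: int) -> str:
--         return "  " * max(level, 0)
--
--     i = 0
--     while i < len(text):
--         ch = text[i]
--
--         if in_string: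
--             out_chars.append(ch)
--             if escape:
--                 escape = False
--             elif ch == "\\":
--                 escape = True
--             elif ch == string_quote:
--                 in_string = False
--         else:
--             if ch in ("\"", "'"):
--                 in_string = True
--                 string_quote = ch
--                 out_chars.append(ch)
--             elif ch == "{":
--                 # Look ahead to see if this is an empty table: {} (possibly with whitespace)
--                 j = i + 1
--                 while j < len(text) and text[j] in " \t\r\n":
--                     j += 1
--                 if j < len(text) and text[j] == "}":
--                     # Emit {} directly, no extra indentation/newlines
--                     out_chars.append("{}")
--                     # Skip over the closing brace in the main loop
--                     i = j
--                 else: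
--                     out_chars.append("{")
--                     indent += 1
--                     out_chars.append("\n" + indent_str(indent))
--             elif ch == "}":
--                 indent -= 1
--                 # If the last piece is just a newline + indent (from a trailing comma),
--                 # reuse it instead of adding another newline to avoid blank lines.
--                 if out_chars and out_chars[-1].startswith("\n"):
--                     out_chars[-1] = "\n" + indent_str(indent) + ch
--                 else:
--                     out_chars.append("\n" + indent_str(indent) + ch)
--             elif ch == ",":
--                 out_chars.append(ch)
--                 out_chars.append("\n" + indent_str(indent))
--             elif ch in " \t\r\n":
--                 # Drop original whitespace outside of strings; formatting controls layout
--                 pass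
--             else:
--                 out_chars.append(ch)
--         i += 1
--
--     return "".join(out_chars)
-- ===== SOURCE B (Python) =====
-- def format_lua_table(text: str) -> str:
--     """Two-pass reformatter: tokenize (string literals whole, whitespace
--     dropped, '{ ... }' with only whitespace collapsed to an empty-table
--     token), then emit with an indent counter and a pending newline piece."""
--
--     WS = " \t\r\n"
--
--     def scan_string(quote, s, i):
--         # s[i-1] was the opening quote; return (literal_including_quotes, next_index)
--         start = i - 1
--         esc = False
--         while i < len(s):
--             c = s[i]
--             i += 1
--             if esc:
--                 esc = False
--             elif c == "\\":
--                 esc = True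
--             elif c == quote:
--                 break
--         return s[start:i], i
--
--     def tokenize(s):
--         toks = []
--         i = 0
--         n = len(s)
--         while i < n:
--             c = s[i]
--             i += 1
--             if c in "\"'":
--                 lit, i = scan_string(c, s, i)
--                 toks.append(("str", lit))
--             elif c == "{":
--                 j = i
--                 while j < n and s[j] in WS:
--                     j += 1
--                 if j < n and s[j] == "}":
--                     toks.append(("empty", ""))
--                     i = j + 1
--                 else:
--                     toks.append(("open", ""))
--             elif c == "}":
--                 toks.append(("close", ""))
--             elif c == ",":
--                 toks.append(("comma", ""))
--             elif c in WS:
--                 pass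
--             else:
--                 toks.append(("chr", c))
--         return toks
--
--     def ind(level):
--         return "  " * max(level, 0)
--
--     acc = []
--     pend = None          # a pending piece beginning with "\n"; a close brace may replace it
--     level = 0
--     for kind, payload in tokenize(text):
--         if kind == "close":
--             level -= 1
--             pend = "\n" + ind(level) + "}"   # merge: overwrite any pending newline piece
--             continue
--         if pend is not None:
--             acc.append(pend)
--             pend = None
--         if kind == "open":
--             level += 1
--             acc.append("{")
--             pend = "\n" + ind(level)
--         elif kind == "comma":
--             acc.append(",")
--             pend = "\n" + ind(level)
--         elif kind == "empty":
--             acc.append("{}")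
--         else:  # "str" or "chr"
--             acc.append(payload)
--     if pend is not None:
--         acc.append(pend)
--     return "".join(acc)
-- ===== Notes on version B (the rewrite author's own statement) =====
-- stated objective: alternative
-- what changed: A's single-pass character state machine (in-string/escape flags, lookahead index jumps, and mutation of the last emitted piece) is re-decomposed into two passes: a tokenizer that scans whole string literals, collapses a brace pair enclosing only whitespace into an empty-table token and drops outside whitespace, followed by an emitter that folds over the token list with an indent counter and a pending-newline piece that a closing brace overwrites.
import Mathlib
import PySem

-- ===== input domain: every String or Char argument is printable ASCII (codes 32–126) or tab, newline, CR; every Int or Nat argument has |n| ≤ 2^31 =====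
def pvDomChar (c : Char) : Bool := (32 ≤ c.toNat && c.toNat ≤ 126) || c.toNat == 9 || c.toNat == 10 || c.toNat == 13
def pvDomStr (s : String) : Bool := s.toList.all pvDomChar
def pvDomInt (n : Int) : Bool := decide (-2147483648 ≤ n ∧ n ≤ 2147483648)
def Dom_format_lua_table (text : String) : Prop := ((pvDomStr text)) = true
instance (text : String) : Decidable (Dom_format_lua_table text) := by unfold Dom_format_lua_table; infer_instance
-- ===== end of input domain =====

-- B re-decomposes A's single-pass state machine into tokenize-then-emit (objective: alternative, same cost).

-- ===== PORT A =====
-- A's whitespace test `ch in " \t\r\n"`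
def pvIsWsA (c : Char) : Bool := c == ' ' || c == '\t' || c == '\r' || c == '\n'

-- A's indent_str
def pvIndentA (level : Int) : String := String.join (List.replicate (max level 0).toNat "  ")

-- "".join(out_chars) with out_chars kept in REVERSE order (appends become conses)
def pvJoinRev : List String → String
  | [] => ""
  | p :: ps => pvJoinRev ps ++ p

-- A's while loop, step for step: state = (in_string, string_quote, escape, indent, out_chars reversed).
-- The inner `j` whitespace lookahead is `dropWhile`; `i = j; i += 1` is continuing after the matched '}'.
def pvLoopA : List Char → Bool → Char → Bool → Int → List String → List String
  | [], _, _, _, _, out => out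
  | ch :: rest, inStr, q, esc, indent, out =>
    if inStr then
      let out := ch.toString :: out
      if esc then pvLoopA rest true q false indent out
      else if ch == '\\' then pvLoopA rest true q true indent out
      else if ch == q then pvLoopA rest false q esc indent out
      else pvLoopA rest true q esc indent out
    else
      if ch == '"' || ch == '\'' then pvLoopA rest true ch esc indent (ch.toString :: out)
      else if ch == '{' then
        match h : rest.dropWhile pvIsWsA with
        | '}' :: rest2 => pvLoopA rest2 false q esc indent ("{}" :: out)
        | _ => pvLoopA rest false q esc (indent + 1)
                 (("\n" ++ pvIndentA (indent + 1)) :: "{" :: out)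
      else if ch == '}' then
        let ind' := indent - 1
        let out' :=
          match out with
          | p :: ps =>
            if PySem.Str.startswith p "\n" then ("\n" ++ pvIndentA ind' ++ "}") :: ps
            else ("\n" ++ pvIndentA ind' ++ "}") :: p :: ps
          | [] => [("\n" ++ pvIndentA ind' ++ "}")]
        pvLoopA rest false q esc ind' out'
      else if ch == ',' then pvLoopA rest false q esc indent (("\n" ++ pvIndentA indent) :: "," :: out)
      else if pvIsWsA ch then pvLoopA rest false q esc indent out
      else pvLoopA rest false q esc indent (ch.toString :: out)
termination_by cs => cs.length
decreasing_by
  all_goals simp_all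
  · have h2 := congrArg List.length h
    have h3 := List.length_dropWhile_le (p := pvIsWsA) (l := rest)
    simp at h2
    omega

def format_lua_table (text : String) : String :=
  pvJoinRev (pvLoopA text.toList false ' ' false 0 [])

-- ===== PORT B =====
inductive PvTok where
  | str : String → PvTok
  | chr : Char → PvTok
  | open_ : PvTok
  | close : PvTok
  | comma : PvTok
  | empty : PvTok
deriving DecidableEq, Repr

def pvIsWsB (c : Char) : Bool := c == ' ' || c == '\t' || c == '\r' || c == '\n'

-- Source B's scan_string: consume a string literal body after its opening quote;
-- returns (consumed chars, rest). `s[start:i]` is opening quote ++ consumed.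
def pvScanStr (q : Char) : List Char → Bool → List Char × List Char
  | [], _ => ([], [])
  | c :: cs, esc =>
    if esc then
      let r := pvScanStr q cs false; (c :: r.1, r.2)
    else if c == '\\' then
      let r := pvScanStr q cs true; (c :: r.1, r.2)
    else if c == q then ([c], cs)
    else
      let r := pvScanStr q cs false; (c :: r.1, r.2)

lemma pvScanStr_len_le (q : Char) : ∀ (cs : List Char) (esc : Bool), (pvScanStr q cs esc).2.length ≤ cs.length := by
  intro cs
  induction cs with
  | nil => intro esc; simp [pvScanStr]
  | cons c cs ih =>
    intro esc
    simp only [pvScanStr]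
    split_ifs <;> simp <;> exact le_trans (ih _) (by omega)

def pvTokenize : List Char → List PvTok
  | [] => []
  | c :: cs =>
    if c == '"' || c == '\'' then
      let r := pvScanStr c cs false
      PvTok.str (String.ofList (c :: r.1)) :: pvTokenize r.2
    else if c == '{' then
      match h : cs.dropWhile pvIsWsB with
      | '}' :: rest => PvTok.empty :: pvTokenize rest
      | _ => PvTok.open_ :: pvTokenize cs
    else if c == '}' then PvTok.close :: pvTokenize cs
    else if c == ',' then PvTok.comma :: pvTokenize cs
    else if pvIsWsB c then pvTokenize cs
    else PvTok.chr c :: pvTokenize cs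
termination_by cs => cs.length
decreasing_by
  all_goals simp_all
  · exact pvScanStr_len_le _ _ _
  · have h2 := congrArg List.length h
    have h3 := List.length_dropWhile_le (p := pvIsWsB) (l := cs)
    simp at h2
    omega

def pvIndentB (level : Int) : String := String.join (List.replicate (max level 0).toNat "  ")

-- Source B's emit loop: state = (accumulated output, pending newline piece, indent level)
def pvEmit : List PvTok → String → Option String → Int → String
  | [], acc, pend, _ => acc ++ pend.getD ""
  | t :: ts, acc, pend, level =>
    match t with
    | PvTok.close => pvEmit ts acc (some ("\n" ++ pvIndentB (level - 1) ++ "}")) (level - 1)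
    | PvTok.open_ => pvEmit ts (acc ++ pend.getD "" ++ "{") (some ("\n" ++ pvIndentB (level + 1))) (level + 1)
    | PvTok.comma => pvEmit ts (acc ++ pend.getD "" ++ ",") (some ("\n" ++ pvIndentB level)) level
    | PvTok.empty => pvEmit ts (acc ++ pend.getD "" ++ "{}") none level
    | PvTok.str s => pvEmit ts (acc ++ pend.getD "" ++ s) none level
    | PvTok.chr c => pvEmit ts (acc ++ pend.getD "" ++ c.toString) none level

def format_lua_table_alt (text : String) : String :=
  pvEmit (pvTokenize text.toList) "" none 0

-- ===== PRECONDITION & SPEC =====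
def Spec_format_lua_table (text : String) (out : String) : Prop := out = format_lua_table_alt text
instance (text : String) (out : String) : Decidable (Spec_format_lua_table text out) := by unfold Spec_format_lua_table; infer_instance

-- ===== CLAIM (what is proved, stated in full; the proofs are below) =====
def Claim_equal_format_lua_table : Prop := ∀ (text : String), Dom_format_lua_table text → Spec_format_lua_table text (format_lua_table text)

-- ===== LEMMAS AND PROOFS =====

lemma pvOfList_cons (c : Char) (l : List Char) :
    String.ofList (c :: l) = Char.toString c ++ String.ofList l := by
  apply String.toList_inj.mp; simp

lemma pvJoinRev_map (l : List Char) (out : List String) :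
    pvJoinRev ((l.map Char.toString).reverse ++ out) = pvJoinRev out ++ String.ofList l := by
  induction l generalizing out with
  | nil =>
    apply String.toList_inj.mp; simp
  | cons c l ih =>
    have : ((c :: l).map Char.toString).reverse ++ out
        = (l.map Char.toString).reverse ++ (Char.toString c :: out) := by simp
    rw [this, ih, pvOfList_cons]
    apply String.toList_inj.mp; simp [pvJoinRev]

-- the loop invariant: A's reversed piece list vs B's (acc, pend) emit state
def pvRel (out : List String) (acc : String) (pend : Option String) : Prop :=
  match pend with
  | some p => ∃ ps, out = p :: ps ∧ pvJoinRev ps = acc ∧ PySem.Str.startswith p "\n" = true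
  | none => pvJoinRev out = acc ∧ ∀ p ps, out = p :: ps → PySem.Str.startswith p "\n" = false

lemma pvRel_join {out acc pend} (h : pvRel out acc pend) :
    pvJoinRev out = acc ++ pend.getD "" := by
  cases pend with
  | none =>
    have := h.1; simpa using this
  | some p =>
    obtain ⟨ps, rfl, hj, _⟩ := h
    simp [pvJoinRev, hj]

lemma pvSw_newline (x : String) : PySem.Str.startswith ("\n" ++ x) "\n" = true := by
  simp [PySem.Chars.startswith_iff]

lemma pvSw_char {c : Char} (h : c ≠ '\n') :
    PySem.Str.startswith (Char.toString c) "\n" = false := by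
  rw [Bool.eq_false_iff]
  intro hsw
  rw [show (Char.toString c) = String.ofList [c] by apply String.toList_inj.mp; simp] at hsw
  have h2 : PySem.Chars.startswith [c] ['\n'] = true := by simpa using hsw
  rw [PySem.Chars.startswith_iff] at h2
  simp [List.cons_prefix_cons] at h2
  exact h h2.symm

-- A's in-string inner loop consumes exactly the characters pvScanStr scans
lemma pvStrLem : ∀ (cs : List Char) (q : Char) (esc : Bool) (indent : Int) (out : List String),
    pvLoopA cs true q esc indent out =
      pvLoopA (pvScanStr q cs esc).2 false q false indent
        (((pvScanStr q cs esc).1.map Char.toString).reverse ++ out) := by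
  intro cs
  induction cs with
  | nil => intro q esc indent out; simp [pvScanStr, pvLoopA]
  | cons c cs ih =>
    intro q esc indent out
    by_cases he : esc
    · subst he
      rw [show pvLoopA (c :: cs) true q true indent out
            = pvLoopA cs true q false indent (c.toString :: out) by simp [pvLoopA]]
      rw [ih]
      simp [pvScanStr]
    · simp only [Bool.not_eq_true] at he; subst he
      by_cases hb : c == '\\'
      · rw [show pvLoopA (c :: cs) true q false indent out
              = pvLoopA cs true q true indent (c.toString :: out) by simp [pvLoopA, hb]]
        rw [ih]
        simp [pvScanStr, hb]
      · by_cases hq : c == q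
        · rw [show pvLoopA (c :: cs) true q false indent out
                = pvLoopA cs false q false indent (c.toString :: out) by simp [pvLoopA, hb, hq]]
          simp [pvScanStr, hb, hq]
        · rw [show pvLoopA (c :: cs) true q false indent out
                = pvLoopA cs true q false indent (c.toString :: out) by simp [pvLoopA, hb, hq]]
          rw [ih]
          simp [pvScanStr, hb, hq]

lemma pvScanStr_closed (q : Char) : ∀ (cs : List Char) (esc : Bool),
    (pvScanStr q cs esc).2 ≠ [] → ∃ pre, (pvScanStr q cs esc).1 = pre ++ [q] := by
  intro cs
  induction cs with
  | nil => intro esc h; simp [pvScanStr] at h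
  | cons c cs ih =>
    intro esc h
    by_cases he : esc
    · subst he
      simp only [pvScanStr] at h ⊢
      obtain ⟨pre, hp⟩ := ih false (by simpa using h)
      exact ⟨c :: pre, by simp [hp]⟩
    · simp only [Bool.not_eq_true] at he; subst he
      by_cases hb : c == '\\'
      · simp only [pvScanStr, hb] at h ⊢
        obtain ⟨pre, hp⟩ := ih true (by simpa using h)
        exact ⟨c :: pre, by simp [hp]⟩
      · by_cases hq : c == q
        · refine ⟨[], ?_⟩
          simp [pvScanStr, hb, hq]
          exact (beq_iff_eq.mp hq)
        · simp only [pvScanStr, hb, hq] at h ⊢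
          obtain ⟨pre, hp⟩ := ih false (by simpa using h)
          exact ⟨c :: pre, by simp [hp]⟩

lemma pvMain : ∀ (n : Nat) (cs : List Char), cs.length ≤ n →
    ∀ (q : Char) (indent : Int) (out : List String) (acc : String) (pend : Option String),
    pvRel out acc pend →
    pvJoinRev (pvLoopA cs false q false indent out) = pvEmit (pvTokenize cs) acc pend indent := by
  intro n
  induction n with
  | zero =>
    intro cs hlen q indent out acc pend hrel
    have : cs = [] := List.eq_nil_of_length_eq_zero (Nat.le_zero.mp hlen)
    subst this
    simpa [pvLoopA, pvTokenize, pvEmit] using pvRel_join hrel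
  | succ n ih =>
    intro cs hlen q indent out acc pend hrel
    cases cs with
    | nil => simpa [pvLoopA, pvTokenize, pvEmit] using pvRel_join hrel
    | cons c rest =>
      have hlen' : rest.length ≤ n := by simpa using hlen
      by_cases hq : (c == '"' || c == '\'') = true
      · -- string literal: A consumes it char by char, B as one token
        have hA : pvLoopA (c :: rest) false q false indent out
            = pvLoopA rest true c false indent (c.toString :: out) := by
          simp [pvLoopA, hq]
        have hT : pvTokenize (c :: rest)
            = PvTok.str (String.ofList (c :: (pvScanStr c rest false).1))
                :: pvTokenize (pvScanStr c rest false).2 := by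
          simp [pvTokenize, hq]
        have hcne : c ≠ '\n' := by
          rcases Bool.or_eq_true_iff.mp hq with h | h <;>
            · rw [beq_iff_eq.mp h]; decide
        have hjoin : pvJoinRev (((pvScanStr c rest false).1.map Char.toString).reverse
              ++ (c.toString :: out))
            = acc ++ pend.getD "" ++ String.ofList (c :: (pvScanStr c rest false).1) := by
          rw [pvJoinRev_map, pvOfList_cons]
          simp [pvJoinRev, pvRel_join hrel]
          apply String.toList_inj.mp; simp
        rw [hA, pvStrLem, hT]
        simp only [pvEmit]
        cases hr2 : (pvScanStr c rest false).2 with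
        | nil =>
          simp only [pvLoopA, pvTokenize, pvEmit]
          simpa using hjoin
        | cons d ds =>
          obtain ⟨pre, hpre⟩ := pvScanStr_closed c rest false (by rw [hr2]; simp)
          refine ih (d :: ds) ?_ c indent _ _ none ?_
          · have hle := pvScanStr_len_le c rest false
            rw [hr2] at hle; simp at hle ⊢; omega
          · constructor
            · exact hjoin
            · intro p ps hcons
              rw [hpre] at hcons
              simp at hcons
              rw [← hcons.1]
              exact pvSw_char hcne
      · by_cases hbr : c == '{'
        · rcases hdw : rest.dropWhile pvIsWsA with _ | ⟨d, ds⟩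
          · -- lookahead hits end of text: open brace
            have hA : pvLoopA (c :: rest) false q false indent out
                = pvLoopA rest false q false (indent + 1)
                    (("\n" ++ pvIndentA (indent + 1)) :: "{" :: out) := by
              simp [pvLoopA, hq, hbr]
              split
              · next rest2 h => rw [hdw] at h; cases h
              · next h => rfl
            have hT : pvTokenize (c :: rest) = PvTok.open_ :: pvTokenize rest := by
              have hdwB : rest.dropWhile pvIsWsB = [] := hdw
              simp [pvTokenize, hq, hbr]
              split
              · next rest2 h => rw [hdwB] at h; cases h
              · next h => rfl
            rw [hA, hT]
            simp only [pvEmit]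
            refine ih rest hlen' q (indent + 1) _ _ _ ?_
            exact ⟨"{" :: out, rfl, by simp [pvJoinRev, pvRel_join hrel], pvSw_newline _⟩
          · by_cases hd : d == '}'
            · -- empty table
              rw [beq_iff_eq.mp hd] at hdw
              have hA : pvLoopA (c :: rest) false q false indent out
                  = pvLoopA ds false q false indent ("{}" :: out) := by
                simp [pvLoopA, hq, hbr]
                split
                · next rest2 h =>
                    rw [hdw] at h
                    injection h with _ h2
                    rw [h2]
                · next h => exact absurd hdw (h ds)
              have hT : pvTokenize (c :: rest) = PvTok.empty :: pvTokenize ds := by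
                have hdwB : rest.dropWhile pvIsWsB = '}' :: ds := hdw
                simp [pvTokenize, hq, hbr]
                split
                · next rest2 h =>
                    rw [hdwB] at h
                    injection h with _ h2
                    rw [h2]
                · next h => exact absurd hdwB (h ds)
              rw [hA, hT]
              simp only [pvEmit]
              refine ih ds ?_ q indent _ _ none ?_
              · have := congrArg List.length hdw
                have h2 := List.length_dropWhile_le (p := pvIsWsA) (l := rest)
                simp at this; omega
              · refine ⟨by simp [pvJoinRev, pvRel_join hrel], ?_⟩
                intro p ps hcons
                simp at hcons
                rw [← hcons.1]
                decide
            · -- nonempty table: open brace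
              have hA : pvLoopA (c :: rest) false q false indent out
                  = pvLoopA rest false q false (indent + 1)
                      (("\n" ++ pvIndentA (indent + 1)) :: "{" :: out) := by
                simp [pvLoopA, hq, hbr]
                split
                · next rest2 h =>
                    rw [hdw] at h
                    injection h with h1 _
                    exact absurd h1 (by simpa using hd)
                · next h => rfl
              have hT : pvTokenize (c :: rest) = PvTok.open_ :: pvTokenize rest := by
                have hdwB : rest.dropWhile pvIsWsB = d :: ds := hdw
                simp [pvTokenize, hq, hbr]
                split
                · next rest2 h =>
                    rw [hdwB] at h
                    injection h with h1 _
                    exact absurd h1 (by simpa using hd)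
                · next h => rfl
              rw [hA, hT]
              simp only [pvEmit]
              refine ih rest hlen' q (indent + 1) _ _ _ ?_
              exact ⟨"{" :: out, rfl, by simp [pvJoinRev, pvRel_join hrel], pvSw_newline _⟩
        · by_cases hcb : c == '}'
          · -- close brace: replace or append the trailing newline piece
            have hT : pvTokenize (c :: rest) = PvTok.close :: pvTokenize rest := by
              simp [pvTokenize, hq, hbr, hcb]
            rw [hT]
            simp only [pvEmit]
            cases pend with
            | some p =>
              obtain ⟨ps, rfl, hj, hsw⟩ := hrel
              have hA : pvLoopA (c :: rest) false q false indent (p :: ps)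
                  = pvLoopA rest false q false (indent - 1)
                      (("\n" ++ pvIndentA (indent - 1) ++ "}") :: ps) := by
                have hsw' : PySem.Chars.startswith p.toList ['\n'] = true := by simpa using hsw
                simp [pvLoopA, hq, hbr, hcb, hsw']
              rw [hA]
              refine ih rest hlen' q (indent - 1) _ _ _ ?_
              exact ⟨ps, rfl, hj, by rw [String.append_assoc]; exact pvSw_newline _⟩
            | none =>
              have hA : pvLoopA (c :: rest) false q false indent out
                  = pvLoopA rest false q false (indent - 1)
                      (("\n" ++ pvIndentA (indent - 1) ++ "}") :: out) := by
                cases out with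
                | nil => simp [pvLoopA, hq, hbr, hcb]
                | cons p ps =>
                  have hsw := hrel.2 p ps rfl
                  have hsw' : PySem.Chars.startswith p.toList ['\n'] = false := by simpa using hsw
                  simp [pvLoopA, hq, hbr, hcb, hsw']
              rw [hA]
              refine ih rest hlen' q (indent - 1) _ _ _ ?_
              refine ⟨out, rfl, by simpa using pvRel_join hrel, ?_⟩
              rw [String.append_assoc]; exact pvSw_newline _
          · by_cases hcm : c == ','
            · -- comma
              have hA : pvLoopA (c :: rest) false q false indent out
                  = pvLoopA rest false q false indent
                      (("\n" ++ pvIndentA indent) :: "," :: out) := by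
                simp [pvLoopA, hq, hbr, hcb, hcm]
              have hT : pvTokenize (c :: rest) = PvTok.comma :: pvTokenize rest := by
                simp [pvTokenize, hq, hbr, hcb, hcm]
              rw [hA, hT]
              simp only [pvEmit]
              refine ih rest hlen' q indent _ _ _ ?_
              exact ⟨"," :: out, rfl, by simp [pvJoinRev, pvRel_join hrel], pvSw_newline _⟩
            · by_cases hws : pvIsWsA c = true
              · -- whitespace dropped by both
                have hA : pvLoopA (c :: rest) false q false indent out
                    = pvLoopA rest false q false indent out := by
                  simp [pvLoopA, hq, hbr, hcb, hcm, hws]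
                have hT : pvTokenize (c :: rest) = pvTokenize rest := by
                  have hwsB : pvIsWsB c = true := hws
                  simp [pvTokenize, hq, hbr, hcb, hcm, hwsB]
                rw [hA, hT]
                exact ih rest hlen' q indent out acc pend hrel
              · -- ordinary character
                have hA : pvLoopA (c :: rest) false q false indent out
                    = pvLoopA rest false q false indent (c.toString :: out) := by
                  simp [pvLoopA, hq, hbr, hcb, hcm, hws]
                have hT : pvTokenize (c :: rest) = PvTok.chr c :: pvTokenize rest := by
                  have hwsB : ¬ pvIsWsB c = true := hws
                  simp [pvTokenize, hq, hbr, hcb, hcm, hwsB]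
                have hcne : c ≠ '\n' := by
                  intro h; rw [h] at hws; exact hws (by decide)
                rw [hA, hT]
                simp only [pvEmit]
                refine ih rest hlen' q indent _ _ none ?_
                refine ⟨by simp [pvJoinRev, pvRel_join hrel], ?_⟩
                intro p ps hcons
                simp at hcons
                rw [← hcons.1]
                exact pvSw_char hcne

theorem format_lua_table_spec : Claim_equal_format_lua_table := by
  intro text _
  unfold Spec_format_lua_table format_lua_table format_lua_table_alt
  exact pvMain text.toList.length text.toList le_rfl ' ' 0 [] "" none
    ⟨rfl, by intro p ps h; cases h⟩
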